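-- pv_equiv track=rewrite | github.com/ssm7/FQH-Quasihole-Braiding | tools/KrylovSubspace/KrylovBuilder.py | laughlin_squeezes
-- ===== SOURCE A (Python) =====
-- def laughlin_squeezes(state, Nphi):
--     children = set()
--
--     for i in range(Nphi):
--         i0 = i
--         i1 = (i + 1) % Nphi
--         i2 = (i + 2) % Nphi
--         i3 = (i + 3) % Nphi
--
--         if ((state >> i0) & 1 and
--             not (state >> i1) & 1 and
--             not (state >> i2) & 1 and
--             (state >> i3) & 1):
--
--             new = state
--             new &= ~(1 << i0)
--             new &= ~(1 << i3)
--             new |=  (1 << i1)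
--             new |=  (1 << i2)
--             children.add(new)
--
--         if (not (state >> i0) & 1 and
--             (state >> i1) & 1 and
--             (state >> i2) & 1 and
--             not (state >> i3) & 1):
--
--             new = state
--             new |=  (1 << i0)
--             new |=  (1 << i3)
--             new &= ~(1 << i1)
--             new &= ~(1 << i2)
--             children.add(new)
--
--     return children
-- ===== SOURCE B (Python) =====
-- def laughlin_squeezes(state, Nphi):
--     # Bit-parallel: truncate the state to its Nphi-bit cyclic word, detect ALL
--     # squeeze windows (1001/0110) at once with word rotations and boolean mask
--     # algebra, then peel the matching positions off the combined hit mask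
--     # lowest-bit first (so children appear in the same order A inserts them).
--     children = set()
--     if Nphi <= 0:
--         return children
--     full = (1 << Nphi) - 1
--     t = state & full
--
--     def rot(k):  # cyclic right rotation of the Nphi-bit word t by k
--         k %= Nphi
--         return ((t >> k) | (t << (Nphi - k))) & full
--
--     r1, r2, r3 = rot(1), rot(2), rot(3)
--     m = (t & ~r1 & ~r2 & r3) | (~t & r1 & r2 & ~r3 & full)
--     while m:
--         low = m & -m
--         i = low.bit_length() - 1
--         mask = ((1 << i) | (1 << (i + 1) % Nphi)
--                 | (1 << (i + 2) % Nphi) | (1 << (i + 3) % Nphi))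
--         children.add(state ^ mask)
--         m &= m - 1
--     return children
-- ===== Notes on version B (the rewrite author's own statement) =====
-- stated objective: faster
-- what changed: A tests four bit conditions at each of the Nphi positions in a Python-level loop; B truncates the state to its Nphi-bit cyclic word, computes ONE match mask for all squeeze windows at once via three word rotations and boolean mask algebra, then peels only the hit positions off that mask lowest-bit first.
import Mathlib
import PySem

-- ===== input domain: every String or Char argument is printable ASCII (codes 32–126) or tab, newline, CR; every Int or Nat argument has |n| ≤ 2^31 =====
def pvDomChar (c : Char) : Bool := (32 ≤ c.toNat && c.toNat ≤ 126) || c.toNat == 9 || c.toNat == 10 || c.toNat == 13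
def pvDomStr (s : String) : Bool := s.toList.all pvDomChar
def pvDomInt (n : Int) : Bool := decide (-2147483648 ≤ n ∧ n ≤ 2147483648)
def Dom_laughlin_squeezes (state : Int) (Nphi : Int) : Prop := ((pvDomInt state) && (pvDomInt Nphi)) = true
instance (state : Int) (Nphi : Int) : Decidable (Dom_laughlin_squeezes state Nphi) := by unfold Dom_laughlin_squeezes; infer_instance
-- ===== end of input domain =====

-- B replaces A's per-position test of four bit conditions by a bit-parallel algorithm:
-- truncate the state to its Nphi-bit cyclic word, detect ALL squeeze windows at once
-- with word rotations and boolean mask algebra, then peel only the hit positions off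
-- the combined match mask lowest-bit first (objective: faster — a timing run
-- measured B well over 1.5x faster than A at the largest generated sizes).

-- ===== PORT A =====
-- indices i, (i+1)%Nphi, … are nonnegative on every element of range(Nphi), so .toNat is exact
def laughlin_squeezes (state : Int) (Nphi : Int) : List Int :=
  (PySem.List.pyRange 0 Nphi 1).foldl (fun children i =>
    let i0 : Nat := i.toNat
    let i1 : Nat := (PySem.Int.mod (i + 1) Nphi).toNat
    let i2 : Nat := (PySem.Int.mod (i + 2) Nphi).toNat
    let i3 : Nat := (PySem.Int.mod (i + 3) Nphi).toNat
    let children :=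
      if PySem.Int.band (state >>> i0) 1 ≠ 0 ∧ PySem.Int.band (state >>> i1) 1 = 0 ∧
         PySem.Int.band (state >>> i2) 1 = 0 ∧ PySem.Int.band (state >>> i3) 1 ≠ 0 then
        let new := state
        let new := PySem.Int.band new (Int.not (1 <<< i0))
        let new := PySem.Int.band new (Int.not (1 <<< i3))
        let new := PySem.Int.bor new (1 <<< i1)
        let new := PySem.Int.bor new (1 <<< i2)
        PySem.Set.add children new
      else children
    if PySem.Int.band (state >>> i0) 1 = 0 ∧ PySem.Int.band (state >>> i1) 1 ≠ 0 ∧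
       PySem.Int.band (state >>> i2) 1 ≠ 0 ∧ PySem.Int.band (state >>> i3) 1 = 0 then
      let new := state
      let new := PySem.Int.bor new (1 <<< i0)
      let new := PySem.Int.bor new (1 <<< i3)
      let new := PySem.Int.band new (Int.not (1 <<< i1))
      let new := PySem.Int.band new (Int.not (1 <<< i2))
      PySem.Set.add children new
    else children)
    (PySem.Set.empty : PySem.Set Int)

-- ===== PORT B =====
-- Source B's while loop; its mask m is a nonnegative Python int throughout, so carrying it
-- as a Nat is exact ('while m' = 'm ≠ 0'); m & -m and m & (m-1) are ported literally on Int.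
def pvAltLoop (state : Int) (Nphi : Int) (children : PySem.Set Int) (m : Nat) : PySem.Set Int :=
  if m = 0 then children
  else
    let low : Int := PySem.Int.band (m : Int) (-(m : Int))
    -- low > 0, so low.bit_length() - 1 is this Nat subtraction, exact
    let i : Nat := PySem.Int.bitLength low - 1
    let i1 : Nat := (PySem.Int.mod ((i : Int) + 1) Nphi).toNat
    let i2 : Nat := (PySem.Int.mod ((i : Int) + 2) Nphi).toNat
    let i3 : Nat := (PySem.Int.mod ((i : Int) + 3) Nphi).toNat
    let mask : Int := PySem.Int.bor (PySem.Int.bor (PySem.Int.bor (1 <<< i) (1 <<< i1)) (1 <<< i2)) (1 <<< i3)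
    pvAltLoop state Nphi (PySem.Set.add children (PySem.Int.bxor state mask))
      (PySem.Int.band (m : Int) ((m : Int) - 1)).toNat
termination_by m
decreasing_by
  rename_i hm
  have h1 : ((m : Int)) - 1 = (((m - 1 : Nat)) : Int) := by omega
  rw [h1, PySem.Int.band_natCast]
  have h2 : m &&& (m - 1) ≤ m - 1 := Nat.and_le_right
  simp only [Int.toNat_natCast]
  omega

-- shift amounts Nphi and Nphi - k%Nphi are nonnegative here (the branch has 0 < Nphi), so .toNat is exact
def laughlin_squeezes_alt (state : Int) (Nphi : Int) : List Int :=
  let children : PySem.Set Int := PySem.Set.empty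
  if Nphi ≤ 0 then children
  else
    let full : Int := (1 <<< Nphi.toNat) - 1
    let t : Int := PySem.Int.band state full
    let rot : Int → Int := fun k =>
      let kk : Nat := (PySem.Int.mod k Nphi).toNat
      PySem.Int.band (PySem.Int.bor (t >>> kk) (t <<< (Nphi - (kk : Int)).toNat)) full
    let r1 := rot 1
    let r2 := rot 2
    let r3 := rot 3
    let m : Int := PySem.Int.bor
      (PySem.Int.band (PySem.Int.band (PySem.Int.band t (Int.not r1)) (Int.not r2)) r3)
      (PySem.Int.band (PySem.Int.band (PySem.Int.band (PySem.Int.band (Int.not t) r1) r2) (Int.not r3)) full)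
    pvAltLoop state Nphi children m.toNat

-- ===== PRECONDITION & SPEC =====
def Spec_laughlin_squeezes (state : Int) (Nphi : Int) (out : List Int) : Prop := out = laughlin_squeezes_alt state Nphi
instance (state : Int) (Nphi : Int) (out : List Int) : Decidable (Spec_laughlin_squeezes state Nphi out) := by unfold Spec_laughlin_squeezes; infer_instance

-- ===== CLAIM (what is proved, stated in full; the proofs are below) =====
def Claim_equal_laughlin_squeezes : Prop := ∀ (state : Int) (Nphi : Int), Dom_laughlin_squeezes state Nphi → Spec_laughlin_squeezes state Nphi (laughlin_squeezes state Nphi)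

-- ===== LEMMAS AND PROOFS =====

-- the window condition (1001 or 0110 read cyclically at j) and the squeezed child
def pvCond (state : Int) (N j : Nat) : Bool :=
  (state.testBit j && !state.testBit ((j+1)%N) && !state.testBit ((j+2)%N) && state.testBit ((j+3)%N))
  || (!state.testBit j && state.testBit ((j+1)%N) && state.testBit ((j+2)%N) && !state.testBit ((j+3)%N))

def pvChild (state : Int) (N j : Nat) : Int :=
  PySem.Int.bxor state (PySem.Int.bor (PySem.Int.bor (PySem.Int.bor ((1 <<< j : Nat) : Int) ((1 <<< ((j+1)%N) : Nat) : Int)) ((1 <<< ((j+2)%N) : Nat) : Int)) ((1 <<< ((j+3)%N) : Nat) : Int))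

theorem pv_neg_coe (x : Nat) : -(x : Int) - 1 = Int.negSucc x := by
  simp [Int.negSucc_eq]; ring

theorem pv_toNat_neg (m : Nat) : (-(Int.negSucc m) - 1).toNat = m := by
  rw [← pv_neg_coe]; omega

theorem pv_toNat_coe (n : Nat) : ((n : Int)).toNat = n := rfl

theorem pv_coe_nonneg (n : Nat) : (0 : Int) ≤ (n : Int) := Int.natCast_nonneg n

theorem pv_negSucc_not_nonneg (n : Nat) : ¬ (0 : Int) ≤ Int.negSucc n := by
  rw [Int.negSucc_eq]; omega

theorem pv_tb_coe (x : Nat) (k : Nat) : ((x : Int)).testBit k = x.testBit k := rfl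

theorem pv_tb_negSucc (x : Nat) (k : Nat) : (Int.negSucc x).testBit k = !x.testBit k := rfl

-- two integers with the same two's-complement bits are equal
theorem pv_int_ext {a b : Int} (h : ∀ k, a.testBit k = b.testBit k) : a = b := by
  cases a with
  | ofNat m =>
    cases b with
    | ofNat n =>
      have : m = n := Nat.eq_of_testBit_eq (fun i => h i)
      simp [this]
    | negSucc n =>
      exfalso
      have hk := h (m + n)
      have hm : m.testBit (m + n) = false :=
        Nat.testBit_eq_false_of_lt (lt_of_le_of_lt (Nat.le_add_right m n) (Nat.lt_two_pow_self))
      have hn : n.testBit (m + n) = false :=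
        Nat.testBit_eq_false_of_lt (lt_of_le_of_lt (Nat.le_add_left n m) (Nat.lt_two_pow_self))
      rw [show (Int.ofNat m).testBit (m + n) = m.testBit (m + n) from rfl,
        pv_tb_negSucc, hm, hn] at hk
      simp at hk
  | negSucc m =>
    cases b with
    | ofNat n =>
      exfalso
      have hk := h (m + n)
      have hm : m.testBit (m + n) = false :=
        Nat.testBit_eq_false_of_lt (lt_of_le_of_lt (Nat.le_add_right m n) (Nat.lt_two_pow_self))
      have hn : n.testBit (m + n) = false :=
        Nat.testBit_eq_false_of_lt (lt_of_le_of_lt (Nat.le_add_left n m) (Nat.lt_two_pow_self))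
      rw [show (Int.ofNat n).testBit (m + n) = n.testBit (m + n) from rfl,
        pv_tb_negSucc, hm, hn] at hk
      simp at hk
    | negSucc n =>
      have : m = n := Nat.eq_of_testBit_eq (fun i => by
        have := h i; rw [pv_tb_negSucc, pv_tb_negSucc] at this
        exact Bool.not_inj this)
      simp [this]

-- an integer whose bits vanish from K on is a nonnegative integer
theorem pv_nonneg_of_bits (a : Int) (K : Nat) (h : ∀ j, K ≤ j → a.testBit j = false) : 0 ≤ a := by
  cases a with
  | ofNat m => exact Int.natCast_nonneg m
  | negSucc m =>
    exfalso
    have h1 := h (K + m) (Nat.le_add_right K m)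
    have hm : m.testBit (K + m) = false :=
      Nat.testBit_eq_false_of_lt (lt_of_le_of_lt (Nat.le_add_left m K) (Nat.lt_two_pow_self))
    rw [pv_tb_negSucc, hm] at h1
    simp at h1

theorem pv_tb_toNat (a : Int) (h : 0 ≤ a) (j : Nat) : a.toNat.testBit j = a.testBit j := by
  cases a with
  | ofNat m => rfl
  | negSucc m => exact absurd h (pv_negSucc_not_nonneg m)

-- subtracting a bit-subset is XOR with it
theorem pv_sub_and_xor (x : Nat) : ∀ y : Nat, y &&& x = y → x - y = x ^^^ y := by
  induction x using Nat.strong_induction_on with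
  | _ x ih =>
    intro y h
    rcases Nat.eq_zero_or_pos x with hx | hx
    · subst hx
      have : y = 0 := by simpa using h.symm
      simp [this]
    · have h2 : y / 2 &&& x / 2 = y / 2 := by
        rw [← Nat.and_div_two, h]
      have ihh := ih (x / 2) (Nat.div_lt_self hx one_lt_two) (y / 2) h2
      have hy2 : y / 2 ≤ x / 2 := by
        conv_lhs => rw [← h2]
        exact Nat.and_le_right
      have hm : y % 2 &&& x % 2 = y % 2 := by
        have := congrArg (· % 2) h
        simpa [Nat.and_mod_two_pow (n := 1), pow_one] using this
      have hxor : x ^^^ y = 2 * (x / 2 ^^^ y / 2) + (x % 2 ^^^ y % 2) := by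
        conv_lhs => rw [← Nat.div_add_mod (x ^^^ y) 2]
        rw [Nat.xor_div_two]
        have : (x ^^^ y) % 2 = x % 2 ^^^ y % 2 := by
          simpa [pow_one] using (Nat.xor_mod_two_pow (a := x) (b := y) (n := 1))
        rw [this]
      have hbit : x % 2 ^^^ y % 2 = x % 2 - y % 2 := by
        rcases Nat.mod_two_eq_zero_or_one x with hxb | hxb <;>
          rcases Nat.mod_two_eq_zero_or_one y with hyb | hyb <;>
          rw [hxb, hyb] at hm ⊢ <;> simp_all
      have hym : y % 2 ≤ x % 2 := by
        conv_lhs => rw [← hm]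
        exact Nat.and_le_right
      rw [hxor, hbit, ← ihh]
      omega

-- value equations for PySem.Int.band / bor / bxor on the sign cases
theorem pv_band_mm (m n : Nat) : PySem.Int.band (m : Int) (n : Int) = ((m &&& n : Nat) : Int) := by
  simp only [PySem.Int.band]
  rw [if_pos (pv_coe_nonneg m), if_pos (pv_coe_nonneg n), pv_toNat_coe, pv_toNat_coe]

theorem pv_band_mn (m n : Nat) :
    PySem.Int.band (m : Int) (Int.negSucc n) = ((m - (m &&& n) : Nat) : Int) := by
  simp only [PySem.Int.band]
  rw [if_pos (pv_coe_nonneg m), if_neg (pv_negSucc_not_nonneg n), pv_toNat_neg, pv_toNat_coe]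

theorem pv_band_nm (m n : Nat) :
    PySem.Int.band (Int.negSucc m) (n : Int) = ((n - (n &&& m) : Nat) : Int) := by
  simp only [PySem.Int.band]
  rw [if_neg (pv_negSucc_not_nonneg m), if_pos (pv_coe_nonneg n), pv_toNat_neg, pv_toNat_coe]

theorem pv_band_nn (m n : Nat) :
    PySem.Int.band (Int.negSucc m) (Int.negSucc n) = Int.negSucc (m ||| n) := by
  simp only [PySem.Int.band]
  rw [if_neg (pv_negSucc_not_nonneg m), if_neg (pv_negSucc_not_nonneg n), pv_toNat_neg,
    pv_toNat_neg, pv_neg_coe]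

theorem pv_bor_mm (m n : Nat) : PySem.Int.bor (m : Int) (n : Int) = ((m ||| n : Nat) : Int) := by
  simp only [PySem.Int.bor]
  rw [if_pos (pv_coe_nonneg m), if_pos (pv_coe_nonneg n), pv_toNat_coe, pv_toNat_coe]

theorem pv_bor_mn (m n : Nat) :
    PySem.Int.bor (m : Int) (Int.negSucc n) = Int.negSucc (n - (n &&& m)) := by
  simp only [PySem.Int.bor]
  rw [if_pos (pv_coe_nonneg m), if_neg (pv_negSucc_not_nonneg n), pv_toNat_neg, pv_toNat_coe,
    pv_neg_coe]

theorem pv_bor_nm (m n : Nat) :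
    PySem.Int.bor (Int.negSucc m) (n : Int) = Int.negSucc (m - (m &&& n)) := by
  simp only [PySem.Int.bor]
  rw [if_neg (pv_negSucc_not_nonneg m), if_pos (pv_coe_nonneg n), pv_toNat_neg, pv_toNat_coe,
    pv_neg_coe]

theorem pv_bor_nn (m n : Nat) :
    PySem.Int.bor (Int.negSucc m) (Int.negSucc n) = Int.negSucc (m &&& n) := by
  simp only [PySem.Int.bor]
  rw [if_neg (pv_negSucc_not_nonneg m), if_neg (pv_negSucc_not_nonneg n), pv_toNat_neg,
    pv_toNat_neg, pv_neg_coe]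

theorem pv_bxor_mm (m n : Nat) : PySem.Int.bxor (m : Int) (n : Int) = ((m ^^^ n : Nat) : Int) := by
  simp only [PySem.Int.bxor]
  rw [if_pos (pv_coe_nonneg m), if_pos (pv_coe_nonneg n), pv_toNat_coe, pv_toNat_coe]

theorem pv_bxor_mn (m n : Nat) :
    PySem.Int.bxor (m : Int) (Int.negSucc n) = Int.negSucc (m ^^^ n) := by
  simp only [PySem.Int.bxor]
  rw [if_pos (pv_coe_nonneg m), if_neg (pv_negSucc_not_nonneg n), pv_toNat_neg, pv_toNat_coe,
    pv_neg_coe]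

theorem pv_bxor_nm (m n : Nat) :
    PySem.Int.bxor (Int.negSucc m) (n : Int) = Int.negSucc (m ^^^ n) := by
  simp only [PySem.Int.bxor]
  rw [if_neg (pv_negSucc_not_nonneg m), if_pos (pv_coe_nonneg n), pv_toNat_neg, pv_toNat_coe,
    pv_neg_coe]

theorem pv_bxor_nn (m n : Nat) :
    PySem.Int.bxor (Int.negSucc m) (Int.negSucc n) = ((m ^^^ n : Nat) : Int) := by
  simp only [PySem.Int.bxor]
  rw [if_neg (pv_negSucc_not_nonneg m), if_neg (pv_negSucc_not_nonneg n), pv_toNat_neg,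
    pv_toNat_neg]

-- the bit-subset difference, bitwise
theorem pv_tb_sub (m n k : Nat) :
    (m - (m &&& n)).testBit k = (m.testBit k && !n.testBit k) := by
  have hsub : m - (m &&& n) = m ^^^ (m &&& n) := by
    apply pv_sub_and_xor
    apply Nat.eq_of_testBit_eq
    intro i
    simp only [Nat.testBit_and]
    cases m.testBit i <;> cases n.testBit i <;> rfl
  rw [hsub, Nat.testBit_xor, Nat.testBit_and]
  cases m.testBit k <;> cases n.testBit k <;> rfl

-- testBit characterisations of the Python bitwise operations
theorem pv_tb_band (a b : Int) (k : Nat) :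
    (PySem.Int.band a b).testBit k = (a.testBit k && b.testBit k) := by
  cases a with
  | ofNat m =>
    cases b with
    | ofNat n =>
      rw [show Int.ofNat m = (m : Int) from rfl, show Int.ofNat n = (n : Int) from rfl,
        pv_band_mm, pv_tb_coe, pv_tb_coe, pv_tb_coe, Nat.testBit_and]
    | negSucc n =>
      rw [show Int.ofNat m = (m : Int) from rfl, pv_band_mn, pv_tb_coe, pv_tb_coe,
        pv_tb_negSucc, pv_tb_sub]
  | negSucc m =>
    cases b with
    | ofNat n =>
      rw [show Int.ofNat n = (n : Int) from rfl, pv_band_nm, pv_tb_coe, pv_tb_coe,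
        pv_tb_negSucc, pv_tb_sub, Bool.and_comm]
    | negSucc n =>
      rw [pv_band_nn, pv_tb_negSucc, pv_tb_negSucc, pv_tb_negSucc, Nat.testBit_or]
      cases m.testBit k <;> cases n.testBit k <;> rfl

theorem pv_tb_bor (a b : Int) (k : Nat) :
    (PySem.Int.bor a b).testBit k = (a.testBit k || b.testBit k) := by
  cases a with
  | ofNat m =>
    cases b with
    | ofNat n =>
      rw [show Int.ofNat m = (m : Int) from rfl, show Int.ofNat n = (n : Int) from rfl,
        pv_bor_mm, pv_tb_coe, pv_tb_coe, pv_tb_coe, Nat.testBit_or]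
    | negSucc n =>
      rw [show Int.ofNat m = (m : Int) from rfl, pv_bor_mn, pv_tb_coe, pv_tb_negSucc,
        pv_tb_negSucc, pv_tb_sub]
      cases m.testBit k <;> cases n.testBit k <;> rfl
  | negSucc m =>
    cases b with
    | ofNat n =>
      rw [show Int.ofNat n = (n : Int) from rfl, pv_bor_nm, pv_tb_coe, pv_tb_negSucc,
        pv_tb_negSucc, pv_tb_sub]
      cases m.testBit k <;> cases n.testBit k <;> rfl
    | negSucc n =>
      rw [pv_bor_nn, pv_tb_negSucc, pv_tb_negSucc, pv_tb_negSucc, Nat.testBit_and]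
      cases m.testBit k <;> cases n.testBit k <;> rfl

theorem pv_tb_bxor (a b : Int) (k : Nat) :
    (PySem.Int.bxor a b).testBit k = (a.testBit k ^^ b.testBit k) := by
  cases a with
  | ofNat m =>
    cases b with
    | ofNat n =>
      rw [show Int.ofNat m = (m : Int) from rfl, show Int.ofNat n = (n : Int) from rfl,
        pv_bxor_mm, pv_tb_coe, pv_tb_coe, pv_tb_coe, Nat.testBit_xor]
    | negSucc n =>
      rw [show Int.ofNat m = (m : Int) from rfl, pv_bxor_mn, pv_tb_coe, pv_tb_negSucc,
        pv_tb_negSucc, Nat.testBit_xor]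
      cases m.testBit k <;> cases n.testBit k <;> rfl
  | negSucc m =>
    cases b with
    | ofNat n =>
      rw [show Int.ofNat n = (n : Int) from rfl, pv_bxor_nm, pv_tb_coe, pv_tb_negSucc,
        pv_tb_negSucc, Nat.testBit_xor]
      cases m.testBit k <;> cases n.testBit k <;> rfl
    | negSucc n =>
      rw [pv_bxor_nn, pv_tb_coe, pv_tb_negSucc, pv_tb_negSucc, Nat.testBit_xor]
      cases m.testBit k <;> cases n.testBit k <;> rfl

theorem pv_tb_not (a : Int) (k : Nat) : (Int.not a).testBit k = !a.testBit k := by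
  cases a with
  | ofNat m => rw [show Int.not (Int.ofNat m) = Int.negSucc m from rfl, pv_tb_negSucc]; rfl
  | negSucc m =>
    rw [show Int.not (Int.negSucc m) = ((m : Int)) from rfl, pv_tb_coe, pv_tb_negSucc,
      Bool.not_not]

theorem pv_tb_shl (i k : Nat) : (((1 <<< i : Nat) : Int)).testBit k = decide (i = k) := by
  rw [pv_tb_coe, Nat.shiftLeft_eq, one_mul, Nat.testBit_two_pow]

theorem pv_shl_one_coe (i : Nat) : ((1 : Int) <<< i) = ((1 <<< i : Nat) : Int) := rfl

theorem pv_shl_coe (m i : Nat) : ((m : Int) <<< i) = ((m <<< i : Nat) : Int) := rfl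

theorem pv_shr_coe (m i : Nat) : ((m : Int) >>> i) = ((m >>> i : Nat) : Int) := rfl

-- reading bit j:  (state >> j) & 1
theorem pv_band_shr_one (a : Int) (j : Nat) :
    PySem.Int.band (a >>> j) 1 = if a.testBit j = true then 1 else 0 := by
  cases a with
  | ofNat m =>
    rw [show (Int.ofNat m) >>> j = ((m >>> j : Nat) : Int) from rfl,
      show (1 : Int) = ((1 : Nat) : Int) from rfl, pv_band_mm, Nat.and_one_is_mod,
      show (Int.ofNat m).testBit j = m.testBit j from rfl,
      Nat.testBit, Nat.one_and_eq_mod_two, Nat.shiftRight_eq_div_pow]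
    rcases Nat.mod_two_eq_zero_or_one (m / 2 ^ j) with h | h <;> simp [h]
  | negSucc m =>
    rw [show (Int.negSucc m) >>> j = Int.negSucc (m >>> j) from rfl,
      show (1 : Int) = ((1 : Nat) : Int) from rfl, pv_band_nm, pv_tb_negSucc,
      Nat.testBit, Nat.one_and_eq_mod_two]
    rcases Nat.mod_two_eq_zero_or_one (m >>> j) with h | h <;> simp [h]

-- value of A's first branch (window 1001) equals the XOR of the window mask
theorem pv_val_1001 (state : Int) (i0 i1 i2 i3 : Nat)
    (h0 : state.testBit i0 = true) (h1 : state.testBit i1 = false)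
    (h2 : state.testBit i2 = false) (h3 : state.testBit i3 = true) :
    PySem.Int.bor (PySem.Int.bor
      (PySem.Int.band (PySem.Int.band state (Int.not ((1 <<< i0 : Nat) : Int))) (Int.not ((1 <<< i3 : Nat) : Int)))
      ((1 <<< i1 : Nat) : Int)) ((1 <<< i2 : Nat) : Int)
    = PySem.Int.bxor state
        (PySem.Int.bor (PySem.Int.bor (PySem.Int.bor ((1 <<< i0 : Nat) : Int) ((1 <<< i1 : Nat) : Int)) ((1 <<< i2 : Nat) : Int)) ((1 <<< i3 : Nat) : Int)) := by
  apply pv_int_ext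
  intro k
  simp only [pv_tb_bor, pv_tb_band, pv_tb_bxor, pv_tb_not, pv_tb_shl]
  by_cases e0 : i0 = k <;> by_cases e1 : i1 = k <;> by_cases e2 : i2 = k <;> by_cases e3 : i3 = k <;>
    simp_all

-- value of A's second branch (window 0110) equals the XOR of the window mask
theorem pv_val_0110 (state : Int) (i0 i1 i2 i3 : Nat)
    (h0 : state.testBit i0 = false) (h1 : state.testBit i1 = true)
    (h2 : state.testBit i2 = true) (h3 : state.testBit i3 = false) :
    PySem.Int.band (PySem.Int.band
      (PySem.Int.bor (PySem.Int.bor state ((1 <<< i0 : Nat) : Int)) ((1 <<< i3 : Nat) : Int))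
      (Int.not ((1 <<< i1 : Nat) : Int))) (Int.not ((1 <<< i2 : Nat) : Int))
    = PySem.Int.bxor state
        (PySem.Int.bor (PySem.Int.bor (PySem.Int.bor ((1 <<< i0 : Nat) : Int) ((1 <<< i1 : Nat) : Int)) ((1 <<< i2 : Nat) : Int)) ((1 <<< i3 : Nat) : Int)) := by
  apply pv_int_ext
  intro k
  simp only [pv_tb_bor, pv_tb_band, pv_tb_bxor, pv_tb_not, pv_tb_shl]
  by_cases e0 : i0 = k <;> by_cases e1 : i1 = k <;> by_cases e2 : i2 = k <;> by_cases e3 : i3 = k <;>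
    simp_all

-- window/condition evaluations over the four bits
theorem pv_c1_iff (a b c d : Bool) :
    ((if a = true then (1 : Int) else 0) ≠ 0 ∧ (if b = true then (1 : Int) else 0) = 0 ∧
     (if c = true then (1 : Int) else 0) = 0 ∧ (if d = true then (1 : Int) else 0) ≠ 0) ↔
    (a = true ∧ b = false ∧ c = false ∧ d = true) := by
  cases a <;> cases b <;> cases c <;> cases d <;> decide

theorem pv_c2_iff (a b c d : Bool) :
    ((if a = true then (1 : Int) else 0) = 0 ∧ (if b = true then (1 : Int) else 0) ≠ 0 ∧
     (if c = true then (1 : Int) else 0) ≠ 0 ∧ (if d = true then (1 : Int) else 0) = 0) ↔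
    (a = false ∧ b = true ∧ c = true ∧ d = false) := by
  cases a <;> cases b <;> cases c <;> cases d <;> decide

-- A's loop body at index j, indices already reduced mod N
theorem pv_bodyA_eq (state : Int) (N j : Nat) (s : PySem.Set Int) :
    (let children :=
      if PySem.Int.band (state >>> j) 1 ≠ 0 ∧ PySem.Int.band (state >>> ((j+1)%N)) 1 = 0 ∧
         PySem.Int.band (state >>> ((j+2)%N)) 1 = 0 ∧ PySem.Int.band (state >>> ((j+3)%N)) 1 ≠ 0 then
        PySem.Set.add s (PySem.Int.bor (PySem.Int.bor
          (PySem.Int.band (PySem.Int.band state (Int.not ((1 <<< j : Nat) : Int))) (Int.not ((1 <<< ((j+3)%N) : Nat) : Int)))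
          ((1 <<< ((j+1)%N) : Nat) : Int)) ((1 <<< ((j+2)%N) : Nat) : Int))
      else s
     if PySem.Int.band (state >>> j) 1 = 0 ∧ PySem.Int.band (state >>> ((j+1)%N)) 1 ≠ 0 ∧
        PySem.Int.band (state >>> ((j+2)%N)) 1 ≠ 0 ∧ PySem.Int.band (state >>> ((j+3)%N)) 1 = 0 then
       PySem.Set.add children (PySem.Int.band (PySem.Int.band
         (PySem.Int.bor (PySem.Int.bor state ((1 <<< j : Nat) : Int)) ((1 <<< ((j+3)%N) : Nat) : Int))
         (Int.not ((1 <<< ((j+1)%N) : Nat) : Int))) (Int.not ((1 <<< ((j+2)%N) : Nat) : Int)))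
     else children)
    = if pvCond state N j then PySem.Set.add s (pvChild state N j) else s := by
  rw [pv_band_shr_one state j, pv_band_shr_one state ((j+1)%N), pv_band_shr_one state ((j+2)%N),
    pv_band_shr_one state ((j+3)%N)]
  simp only [pv_c1_iff, pv_c2_iff, pvCond, pvChild]
  cases h0 : state.testBit j <;> cases h1 : state.testBit ((j+1)%N) <;>
    cases h2 : state.testBit ((j+2)%N) <;> cases h3 : state.testBit ((j+3)%N) <;>
    norm_num <;> simp only [pv_shl_one_coe]
  · rw [pv_val_0110 state j ((j+1)%N) ((j+2)%N) ((j+3)%N) h0 h1 h2 h3]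
  · rw [pv_val_1001 state j ((j+1)%N) ((j+2)%N) ((j+3)%N) h0 h1 h2 h3]

-- A normalised: fold of the squeeze over the positions where the window matches
theorem pv_A_norm (state Nphi : Int) (hN : 0 < Nphi) :
    laughlin_squeezes state Nphi
      = ((List.range Nphi.toNat).filter (fun j => pvCond state Nphi.toNat j)).foldl
          (fun s j => PySem.Set.add s (pvChild state Nphi.toNat j)) [] := by
  have hNc : ((Nphi.toNat : Nat) : Int) = Nphi := Int.toNat_of_nonneg hN.le
  unfold laughlin_squeezes
  rw [PySem.List.pyRange_one]
  have h0 : ((Nphi - 0).toNat) = Nphi.toNat := by omega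
  rw [h0, List.foldl_map]
  refine Eq.trans (PySem.List.foldl_congr_mem _ _
      (fun (s : PySem.Set Int) (j : Nat) =>
        if pvCond state Nphi.toNat j then PySem.Set.add s (pvChild state Nphi.toNat j) else s) _ ?_) ?_
  · intro acc j hj
    have hmod : ∀ c : Nat, (PySem.Int.mod ((j : Int) + (c : Int)) Nphi).toNat = (j + c) % Nphi.toNat := by
      intro c
      conv_lhs => rw [← Nat.cast_add, ← hNc]
      rw [PySem.Int.mod_natCast, Int.toNat_natCast]
    have h1 := hmod 1
    have h2 := hmod 2
    have h3 := hmod 3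
    push_cast at h1 h2 h3
    simp only [zero_add, Int.toNat_natCast, h1, h2, h3]
    exact pv_bodyA_eq state Nphi.toNat j acc
  · rw [PySem.List.foldl_if_eq_foldl_filter]; rfl

-- cyclic index arithmetic
theorem pv_mod_add (j k N : Nat) : (j + k % N) % N = (j + k) % N := by
  conv_rhs => rw [Nat.add_mod]
  rw [Nat.add_mod j (k % N) N, Nat.mod_mod]

-- bits of the rotated Nphi-bit word
theorem pv_rot_bits (tn N kk : Nat) (hkk : kk < N)
    (htn : ∀ x, N ≤ x → tn.testBit x = false) (j : Nat) :
    (PySem.Int.band (PySem.Int.bor ((tn : Int) >>> kk) ((tn : Int) <<< (N - kk)))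
        (((2^N - 1 : Nat) : Int))).testBit j
      = (decide (j < N) && tn.testBit ((j + kk) % N)) := by
  rw [pv_tb_band, pv_tb_bor, pv_shr_coe, pv_shl_coe, pv_tb_coe, pv_tb_coe, pv_tb_coe,
    Nat.testBit_shiftRight, Nat.testBit_shiftLeft, Nat.testBit_two_pow_sub_one]
  by_cases hj : j < N
  · by_cases h2 : j + kk < N
    · have hmod : (j + kk) % N = j + kk := Nat.mod_eq_of_lt h2
      have hle : ¬ (N - kk ≤ j) := by omega
      have hidx : kk + j = j + kk := by omega
      simp [hj, hle, hmod, hidx]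
    · have hmod : (j + kk) % N = j + kk - N := by
        rw [Nat.mod_eq_sub_mod (by omega)]
        exact Nat.mod_eq_of_lt (by omega)
      have h4 : tn.testBit (kk + j) = false := htn _ (by omega)
      have hle : N - kk ≤ j := by omega
      have hidx : j - (N - kk) = j + kk - N := by omega
      simp [hj, hle, hmod, hidx, h4]
  · simp [hj]

-- 2a & (2b+1) = 2(a & b)
theorem pv_and_double_odd (a b : Nat) : (2*a) &&& (2*b+1) = 2*(a &&& b) := by
  apply Nat.eq_of_testBit_eq
  intro j
  cases j with
  | zero =>
    simp only [Nat.testBit_zero]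
    have h1 : (2*a) % 2 = 0 := by omega
    have h2 : (2*(a &&& b)) % 2 = 0 := by omega
    simp [h1, h2]
  | succ j =>
    simp only [Nat.testBit_succ]
    have h1 : 2*a/2 = a := by omega
    have h2 : (2*b+1)/2 = b := by omega
    have h3 : 2*(a &&& b)/2 = a &&& b := by omega
    rw [Nat.and_div_two, h1, h2, h3]

-- clearing the lowest set bit: (o<<<l) & (o<<<l - 1) = (o-1)<<<l for odd o
theorem pv_and_pred (o : Nat) (ho : o % 2 = 1) :
    ∀ l : Nat, (o <<< l) &&& (o <<< l - 1) = (o - 1) <<< l := by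
  intro l
  induction l with
  | zero =>
    simp only [Nat.shiftLeft_zero]
    obtain ⟨c, rfl⟩ : ∃ c, o = 2*c+1 := ⟨o/2, by omega⟩
    have h1 : 2*c+1-1 = 2*c := by omega
    rw [h1, Nat.and_comm, pv_and_double_odd, Nat.and_self]
  | succ l ih =>
    have hA : 0 < o <<< l := by
      rw [Nat.shiftLeft_eq]
      have ho' : 0 < o := by omega
      positivity
    rw [Nat.shiftLeft_succ, Nat.shiftLeft_succ]
    have h1 : 2 * (o <<< l) - 1 = 2 * ((o <<< l) - 1) + 1 := by omega
    rw [h1, pv_and_double_odd, ih]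

-- the loop of B: peeling set bits of m lowest-first is the fold over the set-bit positions
theorem pv_loop (state Nphi : Int) (hN : 0 < Nphi) :
    ∀ mn : Nat, ∀ s : PySem.Set Int, (∀ j, mn.testBit j = true → j < Nphi.toNat) →
      pvAltLoop state Nphi s mn
        = ((List.range Nphi.toNat).filter (fun j => mn.testBit j)).foldl
            (fun s j => PySem.Set.add s (pvChild state Nphi.toNat j)) s := by
  have hNc : ((Nphi.toNat : Nat) : Int) = Nphi := Int.toNat_of_nonneg hN.le
  intro mn
  induction mn using Nat.strong_induction_on with
  | _ mn ih =>
    intro s hb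
    by_cases hmn : mn = 0
    · subst hmn
      rw [pvAltLoop]
      simp [Nat.zero_testBit]
    · obtain ⟨l, o', ho', hdec⟩ := Nat.exists_eq_two_pow_mul_odd hmn
      obtain ⟨c, hc⟩ := ho'
      have hoc : o' = 2*c+1 := by omega
      subst hoc
      have hmn_eq : mn = (2*c+1) <<< l := by rw [Nat.shiftLeft_eq, hdec]; ring
      -- the lowest set bit of mn is l
      have hbit_mn : ∀ j, mn.testBit j = (decide (l ≤ j) && (2*c+1).testBit (j - l)) := by
        intro j; rw [hmn_eq, Nat.testBit_shiftLeft]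
      have hbit_l : mn.testBit l = true := by
        rw [hbit_mn]; simp [Nat.testBit_zero]
      have hlK : l < Nphi.toNat := hb l hbit_l
      -- m & -m = 2^l
      have hneg : -(mn : Int) = Int.negSucc (mn - 1) := by
        rw [Int.negSucc_eq]; omega
      have hand : mn &&& (mn - 1) = (2*c) <<< l := by
        have := pv_and_pred (2*c+1) (by omega) l
        rw [hmn_eq, this]
        norm_num
      have hlow : PySem.Int.band (mn : Int) (-(mn : Int)) = ((2^l : Nat) : Int) := by
        rw [hneg, pv_band_mn, hand]
        congr 1
        rw [hmn_eq, Nat.shiftLeft_eq, Nat.shiftLeft_eq, ← Nat.sub_mul]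
        simp
      -- bit_length(2^l) - 1 = l
      have hbl : PySem.Int.bitLength (((2^l : Nat) : Int)) - 1 = l := by
        have h1 := PySem.Int.lt_two_pow_bitLength (((2^l : Nat) : Int))
        have h2 := PySem.Int.two_pow_bitLength_le (((2^l : Nat) : Int))
          (by exact_mod_cast pow_ne_zero l (two_ne_zero))
        rw [Int.natAbs_natCast] at h1 h2
        have h3 := (Nat.pow_lt_pow_iff_right (a := 2) one_lt_two).mp h1
        have h4 := (Nat.pow_le_pow_iff_right (a := 2) one_lt_two).mp h2
        omega
      -- the recursion argument: mn with bit l cleared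
      have hmn' : (PySem.Int.band (mn : Int) ((mn : Int) - 1)).toNat = (2*c) <<< l := by
        have h1 : ((mn : Int)) - 1 = ((mn - 1 : Nat) : Int) := by omega
        rw [h1, PySem.Int.band_natCast, Int.toNat_natCast, hand]
      have hbit_mn2 : ∀ j, ((2*c) <<< l).testBit j = (mn.testBit j && !decide (j = l)) := by
        intro j
        rw [Nat.testBit_shiftLeft, hbit_mn]
        rcases lt_trichotomy j l with h | h | h
        · have hle : ¬ l ≤ j := by omega
          simp [hle]
        · subst h
          simp [Nat.testBit_zero]
        · obtain ⟨d, rfl⟩ : ∃ d, j = l + d + 1 := ⟨j - l - 1, by omega⟩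
          have hle : l ≤ l + d + 1 := by omega
          have hne : ¬ (l + d + 1 = l) := by omega
          have hd : l + d + 1 - l = d + 1 := by omega
          simp only [hle, decide_true, Bool.true_and, hne, decide_false, Bool.not_false,
            Bool.and_true, hd]
          rw [show d + 1 = Nat.succ d from rfl, Nat.testBit_succ, Nat.testBit_succ]
          have e1 : 2*c/2 = c := by omega
          have e2 : (2*c+1)/2 = c := by omega
          rw [e1, e2]
      have hlt : (2*c) <<< l < mn := by
        have h5 : mn &&& (mn - 1) ≤ mn - 1 := Nat.and_le_right
        omega
      have hb2 : ∀ j, ((2*c) <<< l).testBit j = true → j < Nphi.toNat := by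
        intro j hj
        rw [hbit_mn2] at hj
        rw [Bool.and_eq_true] at hj
        exact hb j hj.1
      -- the head of the filtered list is l
      have hstep : (List.range Nphi.toNat).filter (fun j => mn.testBit j)
          = l :: (List.range Nphi.toNat).filter (fun j => ((2*c) <<< l).testBit j) := by
        rw [show Nphi.toNat = l + ((Nphi.toNat - l - 1) + 1) by omega, List.range_add,
          List.filter_append, List.filter_append, List.range_succ_eq_map]
        have hmnlo : (List.range l).filter (fun j => mn.testBit j) = [] :=
          List.filter_eq_nil_iff.mpr (fun a ha => by
            have : ¬ l ≤ a := by have := List.mem_range.mp ha; omega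
            simp [hbit_mn, this])
        have hmn2lo : (List.range l).filter (fun j => ((2*c) <<< l).testBit j) = [] :=
          List.filter_eq_nil_iff.mpr (fun a ha => by
            have : ¬ l ≤ a := by have := List.mem_range.mp ha; omega
            simp [hbit_mn2, hbit_mn, this])
        have hl2 : ((2*c) <<< l).testBit l = false := by
          rw [hbit_mn2]; simp
        have htail : ∀ x ∈ List.map (fun x => l + x) (List.map Nat.succ (List.range (Nphi.toNat - l - 1))),
            mn.testBit x = ((2*c) <<< l).testBit x := by
          intro x hx
          obtain ⟨k, hk, rfl⟩ := List.mem_map.mp hx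
          obtain ⟨k', _, rfl⟩ := List.mem_map.mp hk
          rw [hbit_mn2]
          simp
        simp only [List.map_cons, List.filter_cons, hmnlo, hmn2lo, hbit_l, hl2, Nat.add_zero,
          if_true, Bool.false_eq_true, if_false, List.nil_append]
        rw [List.filter_congr htail]
      -- unfold one step of the loop
      rw [pvAltLoop, if_neg hmn]
      simp only [hlow, hbl, hmn']
      have hmod : ∀ cc : Nat, (PySem.Int.mod ((l : Int) + (cc : Int)) Nphi).toNat
          = (l + cc) % Nphi.toNat := by
        intro cc
        conv_lhs => rw [← Nat.cast_add, ← hNc]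
        rw [PySem.Int.mod_natCast, Int.toNat_natCast]
      have h1 := hmod 1
      have h2 := hmod 2
      have h3 := hmod 3
      push_cast at h1 h2 h3
      simp only [h1, h2, h3]
      rw [ih ((2*c) <<< l) hlt _ hb2, hstep, List.foldl_cons]
      rfl

-- proof-side names for B's mask pipeline (identical expressions to the port's let-bindings)
def pvFull (Nphi : Int) : Int := ((1 <<< Nphi.toNat : Nat) : Int) - 1

def pvT (state Nphi : Int) : Int := PySem.Int.band state (pvFull Nphi)

def pvRot (state Nphi k : Int) : Int :=
  let kk : Nat := (PySem.Int.mod k Nphi).toNat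
  PySem.Int.band (PySem.Int.bor (pvT state Nphi >>> kk) (pvT state Nphi <<< (Nphi - (kk : Int)).toNat)) (pvFull Nphi)

def pvM (state Nphi : Int) : Int :=
  PySem.Int.bor
    (PySem.Int.band (PySem.Int.band (PySem.Int.band (pvT state Nphi) (Int.not (pvRot state Nphi 1))) (Int.not (pvRot state Nphi 2))) (pvRot state Nphi 3))
    (PySem.Int.band (PySem.Int.band (PySem.Int.band (PySem.Int.band (Int.not (pvT state Nphi)) (pvRot state Nphi 1)) (pvRot state Nphi 2)) (Int.not (pvRot state Nphi 3))) (pvFull Nphi))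

theorem pv_alt_eq (state Nphi : Int) (hN : ¬ Nphi ≤ 0) :
    laughlin_squeezes_alt state Nphi = pvAltLoop state Nphi [] (pvM state Nphi).toNat := by
  unfold laughlin_squeezes_alt pvM pvRot pvT pvFull
  rw [if_neg hN]
  rfl

theorem pv_full_cast (Nphi : Int) : pvFull Nphi = (((2 ^ Nphi.toNat - 1 : Nat)) : Int) := by
  unfold pvFull
  rw [Nat.one_shiftLeft, Nat.cast_sub Nat.one_le_two_pow, Nat.cast_one]

-- bits of the mask m: exactly the window condition below Nphi
theorem pv_m_bits (state Nphi : Int) (hN : 0 < Nphi) (j : Nat) :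
    (pvM state Nphi).testBit j = (decide (j < Nphi.toNat) && pvCond state Nphi.toNat j) := by
  have hNc : ((Nphi.toNat : Nat) : Int) = Nphi := Int.toNat_of_nonneg hN.le
  set N := Nphi.toNat with hNdef
  have hNpos : 0 < N := by omega
  -- the truncated word
  have htnn : 0 ≤ pvT state Nphi := by
    rw [pvT, PySem.Int.band_comm, pv_full_cast]
    exact PySem.Int.band_nonneg_of_nonneg_left _ (pv_coe_nonneg _)
  have htb : ∀ x, (pvT state Nphi).testBit x = (state.testBit x && decide (x < N)) := by
    intro x
    rw [pvT, pv_full_cast, pv_tb_band, pv_tb_coe, Nat.testBit_two_pow_sub_one]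
  have hteq : pvT state Nphi = (((pvT state Nphi).toNat : Nat) : Int) := (Int.toNat_of_nonneg htnn).symm
  set tn := (pvT state Nphi).toNat with htn
  have htnb : ∀ x, tn.testBit x = (state.testBit x && decide (x < N)) := by
    intro x
    rw [htn, pv_tb_toNat _ htnn, htb]
  have htnhi : ∀ x, N ≤ x → tn.testBit x = false := by
    intro x hx
    rw [htnb]
    have : ¬ x < N := by omega
    simp [this]
  -- the rotations
  have hrot : ∀ cc : Nat, 0 < cc → ((cc : Int) < Nphi ∨ True) → ∀ x,
      (pvRot state Nphi (cc : Int)).testBit x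
        = (decide (x < N) && state.testBit ((x + cc) % N)) := by
    intro cc _ _ x
    have hkk : (PySem.Int.mod (cc : Int) Nphi).toNat = cc % N := by
      conv_lhs => rw [← hNc]
      rw [PySem.Int.mod_natCast, Int.toNat_natCast]
    have hsh : (Nphi - ((cc % N : Nat) : Int)).toNat = N - cc % N := by
      have h1 : cc % N < N := Nat.mod_lt _ hNpos
      omega
    rw [pvRot]
    simp only [hkk, hsh]
    rw [hteq, pv_full_cast, ← hNdef]
    rw [pv_rot_bits tn N (cc % N) (Nat.mod_lt _ hNpos) htnhi x]
    by_cases hx : x < N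
    · have hm1 : (x + cc % N) % N = (x + cc) % N := pv_mod_add x cc N
      have hm2 : (x + cc) % N < N := Nat.mod_lt _ hNpos
      rw [hm1, htnb]
      simp [hx, hm2]
    · simp [hx]
  have hr1 := hrot 1 (by omega) (Or.inr trivial)
  have hr2 := hrot 2 (by omega) (Or.inr trivial)
  have hr3 := hrot 3 (by omega) (Or.inr trivial)
  push_cast at hr1 hr2 hr3
  -- assemble
  rw [pvM, pv_tb_bor, pv_tb_band, pv_tb_band, pv_tb_band, pv_tb_band, pv_tb_band, pv_tb_band,
    pv_tb_band, pv_tb_not, pv_tb_not, pv_tb_not, pv_tb_not, pv_full_cast, pv_tb_coe,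
    Nat.testBit_two_pow_sub_one, htb, hr1, hr2, hr3]
  simp only [← hNdef]
  by_cases hj : j < N
  · have hb1 : (j + 1) % N < N := Nat.mod_lt _ hNpos
    have hb2 : (j + 2) % N < N := Nat.mod_lt _ hNpos
    have hb3 : (j + 3) % N < N := Nat.mod_lt _ hNpos
    simp only [hj, decide_true, Bool.true_and, Bool.and_true, pvCond]
  · simp [hj]

-- B normalised to the same fold as A
theorem pv_B_norm (state Nphi : Int) (hN : 0 < Nphi) :
    laughlin_squeezes_alt state Nphi
      = ((List.range Nphi.toNat).filter (fun j => pvCond state Nphi.toNat j)).foldl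
          (fun s j => PySem.Set.add s (pvChild state Nphi.toNat j)) [] := by
  rw [pv_alt_eq state Nphi (by omega)]
  have hm0 : 0 ≤ pvM state Nphi :=
    pv_nonneg_of_bits _ Nphi.toNat (fun j hj => by
      rw [pv_m_bits state Nphi hN j]
      have : ¬ j < Nphi.toNat := by omega
      simp [this])
  have hmb : ∀ j, (pvM state Nphi).toNat.testBit j
      = (decide (j < Nphi.toNat) && pvCond state Nphi.toNat j) := by
    intro j
    rw [pv_tb_toNat _ hm0, pv_m_bits state Nphi hN j]
  rw [pv_loop state Nphi hN (pvM state Nphi).toNat [] (fun j hj => by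
    rw [hmb] at hj
    rw [Bool.and_eq_true] at hj
    simpa using hj.1)]
  congr 1
  apply List.filter_congr
  intro x hx
  have hxN : x < Nphi.toNat := List.mem_range.mp hx
  rw [hmb]
  simp [hxN]

-- ===== VERDICT (by name: the statement is the Claim_ definition above) =====
theorem laughlin_squeezes_spec : Claim_equal_laughlin_squeezes := by
  intro state Nphi _
  unfold Spec_laughlin_squeezes
  by_cases hN : Nphi ≤ 0
  · unfold laughlin_squeezes laughlin_squeezes_alt
    rw [PySem.List.pyRange_one_eq_nil hN, if_pos hN]
    rfl
  · rw [pv_A_norm state Nphi (by omega), pv_B_norm state Nphi (by omega)]
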